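-- pv_equiv track=rewrite | github.com/olive004/gene-circuit-glitch-prediction | src/utils/evolution/mutation.py | reverse_mut_mapping
-- ===== SOURCE A (Python) =====
-- mapping = {
--     # Mutation idx from parent key to child key
--     "A": {
--         "C": 0,
--         "G": 1,
--         "T": 2
--     },
--     "C": {
--         "A": 3,
--         "G": 4,
--         "T": 5
--     },
--     "G": {
--         "A": 6,
--         "C": 7,
--         "T": 8
--     },
--     "T": {
--         "A": 9,
--         "C": 10,
--         "G": 11
--     },
--     "U": {
--         "A": 12,
--         "C": 13,
--         "G": 14
--     }
-- }
--
-- def reverse_mut_mapping(mut_encoding: int):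
--     for k, v in mapping.items():
--         if mut_encoding in list(v.values()):
--             for mut, enc in v.items():
--                 if enc == mut_encoding:
--                     return mut
--     raise ValueError(
--         f'Could not find mutation for mapping key {mut_encoding}.')
-- ===== SOURCE B (Python) =====
-- def reverse_mut_mapping(mut_encoding: int):
--     # Arithmetic decode: encodings are laid out in blocks of 3 per parent
--     # base "ACGTU"; within a block the child is the (n % 3)-th base of
--     # "ACGT" with the parent base removed.
--     if 0 <= mut_encoding < 15:
--         parent = "ACGTU"[mut_encoding // 3]
--         children = [c for c in "ACGT" if c != parent]
--         return children[mut_encoding % 3]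
--     raise ValueError(
--         f'Could not find mutation for mapping key {mut_encoding}.')
-- ===== Notes on version B (the rewrite author's own statement) =====
-- stated objective: alternative
-- what changed: Replaces the nested scan over parent/child dicts with an arithmetic decode: parent base = "ACGTU"[n//3], child = the (n%3)-th base of "ACGT" with the parent removed; no mapping table is consulted at all.
import Mathlib
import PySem

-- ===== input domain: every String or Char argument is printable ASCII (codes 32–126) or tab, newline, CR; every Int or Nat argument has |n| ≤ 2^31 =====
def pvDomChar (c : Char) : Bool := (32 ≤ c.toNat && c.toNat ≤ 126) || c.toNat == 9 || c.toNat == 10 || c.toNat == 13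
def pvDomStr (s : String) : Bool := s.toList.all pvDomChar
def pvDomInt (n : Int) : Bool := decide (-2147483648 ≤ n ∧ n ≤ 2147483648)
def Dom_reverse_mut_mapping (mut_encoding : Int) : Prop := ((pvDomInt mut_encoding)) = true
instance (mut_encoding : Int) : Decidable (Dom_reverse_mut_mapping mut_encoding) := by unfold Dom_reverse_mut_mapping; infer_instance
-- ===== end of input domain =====

-- B replaces A's nested table scan by an arithmetic decode (parent = "ACGTU"[n//3],
-- child = (n%3)-th base of "ACGT" minus the parent); alternative decomposition, no table.

-- ===== PORT A =====
-- the module-level `mapping` constant, as an insertion-ordered association list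
def pvMapping : List (String × List (String × Int)) :=
  [("A", [("C", 0), ("G", 1), ("T", 2)]),
   ("C", [("A", 3), ("G", 4), ("T", 5)]),
   ("G", [("A", 6), ("C", 7), ("T", 8)]),
   ("T", [("A", 9), ("C", 10), ("G", 11)]),
   ("U", [("A", 12), ("C", 13), ("G", 14)])]

-- inner loop: `for mut, enc in v.items(): if enc == mut_encoding: return mut`
def pvInnerScan (v : List (String × Int)) (mut_encoding : Int) : String :=
  match v with
  | [] => ""              -- unreachable in A (guarded by the membership test)
  | (mu, enc) :: rest => if enc = mut_encoding then mu else pvInnerScan rest mut_encoding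

-- outer loop over mapping.items(); falling off the loop raises ValueError (excluded by Pre_)
def pvOuterScan (m : List (String × List (String × Int))) (mut_encoding : Int) : String :=
  match m with
  | [] => ""              -- ValueError in Python; excluded by Pre_
  | (_, v) :: rest =>
      if mut_encoding ∈ v.map Prod.snd then pvInnerScan v mut_encoding
      else pvOuterScan rest mut_encoding

def reverse_mut_mapping (mut_encoding : Int) : String :=
  pvOuterScan pvMapping mut_encoding

-- ===== PORT B =====
-- arithmetic decode, following Source B step for step
def reverse_mut_mapping_alt (mut_encoding : Int) : String :=
  if 0 ≤ mut_encoding ∧ mut_encoding < 15 then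
    let parent := (PySem.List.pyGet? "ACGTU".toList (PySem.Int.floordiv mut_encoding 3)).getD ' '
    -- [c for c in "ACGT" if c != parent]: exact; the 1-char-string comparison is done on the chars
    let children := "ACGT".toList.filter (fun c => c ≠ parent)
    ((PySem.List.pyGet? children (PySem.Int.mod mut_encoding 3)).map String.singleton).getD ""
  else ""                 -- ValueError in Python; excluded by Pre_

-- ===== PRECONDITION & SPEC =====
-- Pre_ excludes exactly the encodings outside 0..14, on which A raises ValueError.
def Pre_reverse_mut_mapping (mut_encoding : Int) : Prop := 0 ≤ mut_encoding ∧ mut_encoding < 15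
instance (mut_encoding : Int) : Decidable (Pre_reverse_mut_mapping mut_encoding) := by unfold Pre_reverse_mut_mapping; infer_instance
def pvWitness_reverse_mut_mapping : Int := (7)
def Spec_reverse_mut_mapping (mut_encoding : Int) (out : String) : Prop := out = reverse_mut_mapping_alt mut_encoding
instance (mut_encoding : Int) (out : String) : Decidable (Spec_reverse_mut_mapping mut_encoding out) := by unfold Spec_reverse_mut_mapping; infer_instance

-- ===== CLAIM =====
def Claim_equal_reverse_mut_mapping : Prop := ∀ (mut_encoding : Int), Dom_reverse_mut_mapping mut_encoding → Pre_reverse_mut_mapping mut_encoding → Spec_reverse_mut_mapping mut_encoding (reverse_mut_mapping mut_encoding)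

-- ===== LEMMAS AND PROOFS =====

-- ===== VERDICT =====
theorem reverse_mut_mapping_spec : Claim_equal_reverse_mut_mapping := by
  intro m _ hpre
  unfold Spec_reverse_mut_mapping
  obtain ⟨h0, h15⟩ := hpre
  interval_cases m <;> decide
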